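-- pv_equiv track=rewrite | github.com/jorgeandres-220/Tarea-1-BMC | Tarea#1_BMC.py | ARNaADN
-- ===== SOURCE A (Python) =====
-- valoresARN = ['A', 'C', 'U', 'G']
--
-- def verificadorARN(cadena):
--     for valor in cadena:
--         if valor not in valoresARN:
--             return False
--     return True
--
-- def ARNaADN(cadena):
--     result = ""
--     if(verificadorARN(cadena)):
--         for valor in cadena:
--             if(valor == "U"):
--                 result += "T"
--             else:
--                 result += valor
--     return result
-- ===== SOURCE B (Python) =====
-- def ARNaADN(cadena):
--     out = []
--     for valor in cadena:
--         if valor not in ('A', 'C', 'U', 'G'):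
--             return ""
--         out.append('T' if valor == 'U' else valor)
--     return "".join(out)
-- ===== Notes on version B (the rewrite author's own statement) =====
-- stated objective: simpler
-- what changed: Fuses A's validate-then-convert two passes into one pass that converts while scanning and bails out with the empty result as soon as an invalid character is seen.
import Mathlib
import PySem

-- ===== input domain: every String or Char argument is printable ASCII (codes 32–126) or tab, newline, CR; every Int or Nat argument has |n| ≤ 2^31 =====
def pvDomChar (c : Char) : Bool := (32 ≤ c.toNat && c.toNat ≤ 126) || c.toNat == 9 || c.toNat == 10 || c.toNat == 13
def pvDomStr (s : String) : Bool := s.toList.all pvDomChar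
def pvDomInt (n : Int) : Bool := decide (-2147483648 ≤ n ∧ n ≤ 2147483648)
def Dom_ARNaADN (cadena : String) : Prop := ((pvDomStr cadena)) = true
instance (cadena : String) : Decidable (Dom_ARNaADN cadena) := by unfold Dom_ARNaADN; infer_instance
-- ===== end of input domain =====

-- B fuses A's validate-then-convert two passes into one pass with an an early empty-string return on an invalid character.

-- ===== PORT A =====
def valoresARN : List Char := ['A', 'C', 'U', 'G']

def verificadorARN_loop : List Char → Bool
  | [] => true
  | valor :: rest => if ¬ (valoresARN.contains valor) then false else verificadorARN_loop rest

def verificadorARN (cadena : String) : Bool := verificadorARN_loop cadena.toList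

def ARNaADN_loop : List Char → List Char → List Char
  | acc, [] => acc
  | acc, valor :: rest =>
      if valor = 'U' then ARNaADN_loop (acc ++ ['T']) rest
      else ARNaADN_loop (acc ++ [valor]) rest

def ARNaADN (cadena : String) : String :=
  if verificadorARN cadena then String.ofList (ARNaADN_loop [] cadena.toList) else ""

-- ===== PORT B =====
def ARNaADN_alt_loop : List Char → List Char → String
  | acc, [] => String.ofList acc
  | acc, valor :: rest =>
      if ¬ (valor ∈ ['A', 'C', 'U', 'G']) then ""
      else ARNaADN_alt_loop (acc ++ [if valor = 'U' then 'T' else valor]) rest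

def ARNaADN_alt (cadena : String) : String := ARNaADN_alt_loop [] cadena.toList

-- ===== PRECONDITION & SPEC =====
def Spec_ARNaADN (cadena : String) (out : String) : Prop := out = ARNaADN_alt cadena
instance (cadena : String) (out : String) : Decidable (Spec_ARNaADN cadena out) := by unfold Spec_ARNaADN; infer_instance

-- ===== CLAIM (what is proved, stated in full; the proofs are below) =====
def Claim_equal_ARNaADN : Prop := ∀ (cadena : String), Dom_ARNaADN cadena → Spec_ARNaADN cadena (ARNaADN cadena)

-- ===== LEMMAS AND PROOFS =====
theorem alt_loop_spec (l : List Char) : ∀ acc : List Char,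
    (verificadorARN_loop l = true → ARNaADN_alt_loop acc l = String.ofList (ARNaADN_loop acc l)) ∧
    (verificadorARN_loop l = false → ARNaADN_alt_loop acc l = "") := by
  induction l with
  | nil =>
    intro acc
    exact ⟨fun _ => rfl, fun h => by simp [verificadorARN_loop] at h⟩
  | cons c rest ih =>
    intro acc
    by_cases hc : c ∈ valoresARN
    · have hc' : c ∈ ['A', 'C', 'U', 'G'] := hc
      constructor
      · intro h
        simp only [verificadorARN_loop, hc, List.contains_eq_mem] at h
        simp only [ARNaADN_alt_loop, hc', not_true, if_false, ARNaADN_loop]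
        by_cases hu : c = 'U'
        · simp only [hu]
          exact (ih _).1 h
        · simp only [if_neg hu]
          exact (ih _).1 h
      · intro h
        simp only [verificadorARN_loop, List.contains_eq_mem, decide_eq_true hc] at h
        simp only [ARNaADN_alt_loop, hc', not_true, if_false]
        by_cases hu : c = 'U'
        · simp only [hu]; exact (ih _).2 h
        · simp only [if_neg hu]; exact (ih _).2 h
    · have hc' : c ∉ ['A', 'C', 'U', 'G'] := hc
      constructor
      · intro h
        simp [verificadorARN_loop, List.contains_eq_mem, hc] at h
      · intro _
        simp [ARNaADN_alt_loop, hc']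

-- ===== VERDICT (by name: the statement is the Claim_ definition above) =====
theorem ARNaADN_spec : Claim_equal_ARNaADN := by
  intro cadena _
  unfold Spec_ARNaADN ARNaADN ARNaADN_alt verificadorARN
  by_cases h : verificadorARN_loop cadena.toList = true
  · rw [if_pos h, (alt_loop_spec cadena.toList []).1 h]
  · rw [if_neg h, (alt_loop_spec cadena.toList []).2 (by simpa using h)]
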